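-- pv_equiv track=rewrite | github.com/SaarShai/Primes-Equispaced | koyama-shared/scripts/ndc_gl2_full_test.py | multiplicative_mu_from_ap
-- ===== SOURCE A (Python) =====
-- def multiplicative_mu_from_ap(n, ap_dict, curve_N):
--     """μ_E(n) via Hecke multiplicativity on a GL(2) newform.
--     μ_E(p) = -a_p, μ_E(p²) = a_p² - p (for good reduction).
--     For bad reduction (p|N): μ_E(p) = -a_p, μ_E(p^k≥2) = 0."""
--     if n == 1: return 1
--     # Find prime factorization
--     res = 1
--     for p in sorted(ap_dict.keys()):
--         if n == 1: break
--         if p * p > n and n > 1 and n in ap_dict: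
--             res *= -ap_dict[n]
--             n = 1; break
--         if n % p == 0:
--             k = 0
--             while n % p == 0: n //= p; k += 1
--             ap = ap_dict[p]
--             bad = (curve_N % p == 0)
--             if k == 1: res *= -ap
--             elif k == 2:
--                 if bad: return 0
--                 res *= (ap*ap - p)
--             else: return 0
--     if n > 1: return 0
--     return res
-- ===== SOURCE B (Python) =====
-- def _split(n, p):
--     """Divide p out of n completely: return (m, k) with n = m * p**k, p not dividing m."""
--     q, r = divmod(n, p)
--     if r != 0:
--         return n, 0
--     m, k = _split(q, p)
--     return m, k + 1
--
--
-- def multiplicative_mu_from_ap(n, ap_dict, curve_N):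
--     """Two phases: first peel the factorization of n along the sorted key list
--     (with the large-cofactor shortcut), then evaluate the Hecke rules over the
--     collected (p, k) factors."""
--     factors = []
--     for p in sorted(ap_dict):
--         if n == 1:
--             break
--         if p * p > n and n > 1 and n in ap_dict:
--             factors.append((n, 1))
--             n = 1
--             break
--         n, k = _split(n, p)
--         if k:
--             factors.append((p, k))
--     if n > 1:
--         return 0
--     res = 1
--     for p, k in factors:
--         if k == 1:
--             res *= -ap_dict[p]
--         elif k == 2 and curve_N % p != 0:
--             res *= ap_dict[p] ** 2 - p
--         else:
--             return 0
--     return res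
-- ===== Notes on version B (the rewrite author's own statement) =====
-- stated objective: alternative
-- what changed: B splits A's single stateful loop (interleaved early returns and a running product) into two phases: a factor-collection pass along the sorted keys that records (p,k) pairs (the large-cofactor shortcut becomes an ordinary (n,1) factor, exponents computed by a recursive divmod helper instead of an inline while), and a separate evaluation pass mapping each factor through the Hecke rules; A's early 'return 0' exits become absorbing zero factors found by the second pass.
-- outside the precondition, e.g. on multiplicative_mu_from_ap(1, {0: 5}, 3): A returns 1, B returns 1; on multiplicative_mu_from_ap(7, {-3: 2, 7: 4, 1: 9}, 3): A returns -4, B returns -4; on multiplicative_mu_from_ap(2147483648, {3243: 1, 6: 2, 4: 0, -1: 3, -2: 4}, 1000000): A returns 0, B raises RecursionError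
import Mathlib
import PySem

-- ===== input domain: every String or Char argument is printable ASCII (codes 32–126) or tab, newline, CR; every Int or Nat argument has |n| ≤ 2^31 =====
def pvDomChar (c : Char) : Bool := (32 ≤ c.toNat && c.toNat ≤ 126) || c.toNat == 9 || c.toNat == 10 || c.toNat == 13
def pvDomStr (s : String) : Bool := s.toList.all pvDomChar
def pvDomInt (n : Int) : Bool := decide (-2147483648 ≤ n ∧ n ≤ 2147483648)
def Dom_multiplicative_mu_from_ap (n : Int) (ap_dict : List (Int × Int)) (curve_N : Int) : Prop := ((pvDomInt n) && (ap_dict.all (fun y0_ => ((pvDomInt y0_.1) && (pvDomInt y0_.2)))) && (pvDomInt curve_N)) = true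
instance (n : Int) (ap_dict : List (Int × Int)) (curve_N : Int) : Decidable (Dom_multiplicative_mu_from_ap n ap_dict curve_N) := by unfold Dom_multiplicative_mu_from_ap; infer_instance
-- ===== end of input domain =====

-- B restructures A's single stateful loop into a factor-collection pass followed by a
-- separate Hecke-rule evaluation pass (objective: alternative; same cost, no speed claim).

-- ===== PORT A =====

-- `while n % p == 0: n //= p; k += 1` — fuel-bounded; fuel n.natAbs suffices on every
-- input where the Python loop terminates (each exact division by |p| ≥ 2 halves |n|)
def pyDivOut : Nat → Int → Int → Int × Int
  | 0, _, n => (n, 0)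
  | f + 1, p, n =>
    if PySem.Int.mod n p = 0 then
      let r := pyDivOut f p (PySem.Int.floordiv n p)
      (r.1, r.2 + 1)
    else (n, 0)

-- after the for-loop: `if n > 1: return 0` then `return res`
def postA (n res : Int) : Int := if 1 < n then 0 else res

-- the `for p in sorted(ap_dict.keys())` loop, state (n, res); breaks jump to postA
def loopA (d : PySem.Dict Int Int) (cN : Int) : List Int → Int → Int → Int
  | [], n, res => postA n res
  | p :: ps, n, res =>
    if n = 1 then postA n res
    else if n < p * p ∧ 1 < n ∧ d.contains n then postA 1 (res * -(d.getD n 0))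
    else if PySem.Int.mod n p = 0 then
      let r := pyDivOut n.natAbs p n
      let ap := d.getD p 0
      if r.2 = 1 then loopA d cN ps r.1 (res * -ap)
      else if r.2 = 2 then
        if PySem.Int.mod cN p = 0 then 0
        else loopA d cN ps r.1 (res * (ap * ap - p))
      else 0
    else loopA d cN ps n res

def multiplicative_mu_from_ap (n : Int) (ap_dict : List (Int × Int)) (curve_N : Int) : Int :=
  if n = 1 then 1
  else
    let d := PySem.Dict.ofList ap_dict
    loopA d curve_N (PySem.List.sorted d.keys (fun x => x) false) n 1

-- ===== PORT B =====

-- Source B's recursive `_split` via divmod; fuel-bounded like pyDivOut (divmod? = none is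
-- Python's ZeroDivisionError, unreachable inside Pre_)
def pySplit : Nat → Int → Int → Int × Int
  | 0, _, n => (n, 0)
  | f + 1, p, n =>
    match PySem.Int.divmod? n p with
    | none => (n, 0)
    | some (q, r) =>
      if r ≠ 0 then (n, 0)
      else
        let s := pySplit f p q
        (s.1, s.2 + 1)

-- first pass: collect (p, k) factors along the sorted keys; returns (leftover n, factors)
def phase1 (d : PySem.Dict Int Int) : List Int → Int → List (Int × Int) → Int × List (Int × Int)
  | [], n, fs => (n, fs)
  | p :: ps, n, fs =>
    if n = 1 then (n, fs)
    else if n < p * p ∧ 1 < n ∧ d.contains n then (1, fs ++ [(n, 1)])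
    else
      let s := pySplit n.natAbs p n
      phase1 d ps s.1 (if s.2 ≠ 0 then fs ++ [(p, s.2)] else fs)

-- second pass: evaluate the Hecke rules over the collected factors
def phase2 (d : PySem.Dict Int Int) (cN : Int) : List (Int × Int) → Int → Int
  | [], res => res
  | (p, k) :: fs, res =>
    if k = 1 then phase2 d cN fs (res * -(d.getD p 0))
    else if k = 2 ∧ PySem.Int.mod cN p ≠ 0 then phase2 d cN fs (res * ((d.getD p 0) ^ 2 - p))
    else 0

def multiplicative_mu_from_ap_alt (n : Int) (ap_dict : List (Int × Int)) (curve_N : Int) : Int :=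
  let d := PySem.Dict.ofList ap_dict
  let r := phase1 d (PySem.List.sorted d.keys (fun x => x) false) n []
  if 1 < r.1 then 0 else phase2 d curve_N r.2 1

-- ===== PRECONDITION & SPEC =====

-- Pre_ excludes exactly the inputs where Python A does not return: n = 0 with a nonempty
-- dict (the inner while loop never terminates on n = 0, or n % 0 raises), and any dict with
-- a key 0, 1 or -1 (n % 0 raises ZeroDivisionError; dividing by ±1 never shrinks n, so the
-- while loop diverges whenever such a key is reached with n ≠ 1). On the few such inputs
-- where an earlier break lets A return anyway (e.g. n = 1, or a shortcut fires before the
-- bad key), B returns the same value.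
def Pre_multiplicative_mu_from_ap (n : Int) (ap_dict : List (Int × Int)) (curve_N : Int) : Prop :=
  (n ≠ 0 ∨ ap_dict = []) ∧ ∀ pr ∈ ap_dict, pr.1 ≠ 0 ∧ pr.1 ≠ 1 ∧ pr.1 ≠ -1

instance (n : Int) (ap_dict : List (Int × Int)) (curve_N : Int) : Decidable (Pre_multiplicative_mu_from_ap n ap_dict curve_N) := by unfold Pre_multiplicative_mu_from_ap; infer_instance

def pvWitness_multiplicative_mu_from_ap : Int × (List (Int × Int)) × Int := (12, [(2, 1), (3, 5)], 7)

def Spec_multiplicative_mu_from_ap (n : Int) (ap_dict : List (Int × Int)) (curve_N : Int) (out : Int) : Prop := out = multiplicative_mu_from_ap_alt n ap_dict curve_N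
instance (n : Int) (ap_dict : List (Int × Int)) (curve_N : Int) (out : Int) : Decidable (Spec_multiplicative_mu_from_ap n ap_dict curve_N out) := by unfold Spec_multiplicative_mu_from_ap; infer_instance

-- ===== CLAIM (what is proved, stated in full; the proofs are below) =====
def Claim_equal_multiplicative_mu_from_ap : Prop := ∀ (n : Int) (ap_dict : List (Int × Int)) (curve_N : Int), Dom_multiplicative_mu_from_ap n ap_dict curve_N → Pre_multiplicative_mu_from_ap n ap_dict curve_N → Spec_multiplicative_mu_from_ap n ap_dict curve_N (multiplicative_mu_from_ap n ap_dict curve_N)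

-- ===== LEMMAS AND PROOFS =====

theorem pvWitness_ok : Dom_multiplicative_mu_from_ap pvWitness_multiplicative_mu_from_ap.1 pvWitness_multiplicative_mu_from_ap.2.1 pvWitness_multiplicative_mu_from_ap.2.2 ∧ Pre_multiplicative_mu_from_ap pvWitness_multiplicative_mu_from_ap.1 pvWitness_multiplicative_mu_from_ap.2.1 pvWitness_multiplicative_mu_from_ap.2.2 := by
  decide

-- the two exponent helpers compute the same pair (n ≠ 0 keeps the fuel-0 cases aligned)
theorem pyDivOut_eq_pySplit (f : Nat) (p n : Int) (hn : n ≠ 0 ∨ f = 0) :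
    pyDivOut f p n = pySplit f p n := by
  induction f generalizing n with
  | zero => rfl
  | succ f ih =>
    rcases hn with hn | hn
    · by_cases hp : p = 0
      · subst hp
        have hm : PySem.Int.mod n 0 = n := by simp [PySem.Int.mod]
        simp [pyDivOut, pySplit, hm, hn, PySem.Int.divmod?]
      · have hdm : PySem.Int.divmod? n p = some (PySem.Int.floordiv n p, PySem.Int.mod n p) := by
          simp [PySem.Int.divmod?, hp, PySem.Int.floordiv, PySem.Int.mod]
        by_cases hz : PySem.Int.mod n p = 0
        · have hq : PySem.Int.floordiv n p ≠ 0 := by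
            intro h0
            have := PySem.Int.floordiv_mul_add_mod n p
            rw [h0, hz] at this
            simp at this
            exact hn this.symm
          simp [pyDivOut, pySplit, hdm, hz, ih _ (Or.inl hq)]
        · simp [pyDivOut, pySplit, hdm, hz]
    · exact absurd hn (Nat.succ_ne_zero f)

theorem pySplit_ne_zero (f : Nat) (p n : Int) (hn : n ≠ 0) : (pySplit f p n).1 ≠ 0 := by
  induction f generalizing n with
  | zero => simpa [pySplit] using hn
  | succ f ih =>
    by_cases hp : p = 0
    · simpa [pySplit, hp, PySem.Int.divmod?] using hn
    · have hdm : PySem.Int.divmod? n p = some (PySem.Int.floordiv n p, PySem.Int.mod n p) := by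
        simp [PySem.Int.divmod?, hp, PySem.Int.floordiv, PySem.Int.mod]
      by_cases hz : PySem.Int.mod n p = 0
      · have hq : PySem.Int.floordiv n p ≠ 0 := by
          intro h0
          have := PySem.Int.floordiv_mul_add_mod n p
          rw [h0, hz] at this
          simp at this
          exact hn this.symm
        simpa [pySplit, hdm, hz] using ih _ hq
      · simpa [pySplit, hdm, hz] using hn

-- the division counter never goes negative
theorem pySplit_snd_nonneg (f : Nat) (p n : Int) : 0 ≤ (pySplit f p n).2 := by
  induction f generalizing n with
  | zero => simp [pySplit]
  | succ f ih =>
    by_cases hp : p = 0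
    · simp [pySplit, hp, PySem.Int.divmod?]
    · have hdm : PySem.Int.divmod? n p = some (PySem.Int.floordiv n p, PySem.Int.mod n p) := by
        simp [PySem.Int.divmod?, hp, PySem.Int.floordiv, PySem.Int.mod]
      by_cases hz : PySem.Int.mod n p = 0
      · have := ih (PySem.Int.floordiv n p)
        simp [pySplit, hdm, hz]
        omega
      · simp [pySplit, hdm, hz]

-- if pySplit takes no division step, n was not divisible (or p = 0), and conversely
theorem pySplit_snd_zero_iff (f : Nat) (p n : Int) (hf : f ≠ 0) :
    (pySplit f p n).2 = 0 ↔ ¬ (p ≠ 0 ∧ PySem.Int.mod n p = 0) := by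
  cases f with
  | zero => omega
  | succ f =>
    by_cases hp : p = 0
    · simp [pySplit, hp, PySem.Int.divmod?]
    · have hdm : PySem.Int.divmod? n p = some (PySem.Int.floordiv n p, PySem.Int.mod n p) := by
        simp [PySem.Int.divmod?, hp, PySem.Int.floordiv, PySem.Int.mod]
      by_cases hz : PySem.Int.mod n p = 0
      · have := pySplit_snd_nonneg f p (PySem.Int.floordiv n p)
        simp [pySplit, hdm, hz, hp]
        omega
      · simp [pySplit, hdm, hz, hp]

-- phase1's accumulator only ever grows by appending
theorem phase1_acc (d : PySem.Dict Int Int) (ps : List Int) (n : Int) (fs : List (Int × Int)) :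
    phase1 d ps n fs = ((phase1 d ps n []).1, fs ++ (phase1 d ps n []).2) := by
  induction ps generalizing n fs with
  | nil => simp [phase1]
  | cons p ps ih =>
    by_cases h1 : n = 1
    · simp [phase1, h1]
    · by_cases h2 : n < p * p ∧ 1 < n ∧ d.contains n
      · simp [phase1, h1, h2]
      · by_cases h3 : (pySplit n.natAbs p n).2 ≠ 0
        · simp only [phase1, if_neg h1, if_neg h2, if_pos h3, List.nil_append]
          rw [ih ((pySplit n.natAbs p n).1) (fs ++ [(p, (pySplit n.natAbs p n).2)]),
            ih ((pySplit n.natAbs p n).1) [(p, (pySplit n.natAbs p n).2)]]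
          simp
        · simp only [phase1, if_neg h1, if_neg h2, if_neg h3]
          exact ih _ _

-- phase2 is res times its value at res = 1 (its 0-exits absorb)
theorem phase2_mul (d : PySem.Dict Int Int) (cN : Int) (fs : List (Int × Int)) (res : Int) :
    phase2 d cN fs res = res * phase2 d cN fs 1 := by
  induction fs generalizing res with
  | nil => simp [phase2]
  | cons pk fs ih =>
    obtain ⟨p, k⟩ := pk
    by_cases h1 : k = 1
    · simp only [phase2, if_pos h1]
      rw [ih, ih (res := 1 * -(d.getD p 0))]
      ring
    · by_cases h2 : k = 2 ∧ PySem.Int.mod cN p ≠ 0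
      · simp only [phase2, if_neg h1, if_pos h2]
        rw [ih, ih (res := 1 * ((d.getD p 0) ^ 2 - p))]
        ring
      · simp [phase2, h1, h2]

-- one factor's multiplicative contribution (a 0-exit is an absorbing 0 factor)
theorem phase2_cons (d : PySem.Dict Int Int) (cN p k : Int) (fs : List (Int × Int)) (res : Int) :
    phase2 d cN ((p, k) :: fs) res =
      (if k = 1 then -(d.getD p 0)
       else if k = 2 ∧ PySem.Int.mod cN p ≠ 0 then (d.getD p 0) ^ 2 - p
       else 0) * phase2 d cN fs res := by
  by_cases h1 : k = 1
  · simp only [phase2, if_pos h1]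
    rw [phase2_mul, phase2_mul d cN fs res]
    ring
  · by_cases h2 : k = 2 ∧ PySem.Int.mod cN p ≠ 0
    · simp only [phase2, if_neg h1, if_pos h2]
      rw [phase2_mul, phase2_mul d cN fs res]
      ring
    · simp [phase2, h1, h2]

-- the central invariant: A's loop equals B's two phases run from the same point
theorem loopA_eq_phases (d : PySem.Dict Int Int) (cN : Int) (ps : List Int) (n res : Int)
    (hn : n ≠ 0) :
    loopA d cN ps n res =
      (if 1 < (phase1 d ps n []).1 then 0 else res * phase2 d cN (phase1 d ps n []).2 1) := by
  induction ps generalizing n res with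
  | nil =>
    simp only [loopA, phase1, postA, phase2]
    split_ifs <;> ring
  | cons p ps ih =>
    by_cases h1 : n = 1
    · simp [loopA, phase1, h1, postA, phase2]
    · by_cases h2 : n < p * p ∧ 1 < n ∧ d.contains n
      · simp only [loopA, phase1, if_neg h1, if_pos h2, postA]
        have h11 : ¬ (1 : Int) < 1 := by omega
        simp only [if_neg h11, List.nil_append]
        rw [phase2_cons]
        simp [phase2]
      · have hbridge : pyDivOut n.natAbs p n = pySplit n.natAbs p n :=
          pyDivOut_eq_pySplit _ _ _ (Or.inl hn)
        have hf : n.natAbs ≠ 0 := by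
          intro h; exact hn (by omega)
        by_cases hz : PySem.Int.mod n p = 0
        · have hp : p ≠ 0 := by
            intro hp0
            apply hn
            rw [hp0] at hz
            simpa [PySem.Int.mod] using hz
          have hk : (pySplit n.natAbs p n).2 ≠ 0 := by
            rw [ne_eq, pySplit_snd_zero_iff _ _ _ hf]
            exact not_not_intro ⟨hp, hz⟩
          have hm : (pySplit n.natAbs p n).1 ≠ 0 := pySplit_ne_zero _ _ _ hn
          simp only [loopA, phase1, if_neg h1, if_neg h2, if_pos hz, hbridge, if_pos hk]
          rw [phase1_acc, List.nil_append]
          dsimp only [List.singleton_append]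
          set s := pySplit n.natAbs p n with hs
          by_cases hk1 : s.2 = 1
          · rw [if_pos hk1, hk1, ih _ _ hm]
            split_ifs with hgt
            · rfl
            · rw [phase2_cons, if_pos rfl]
              ring
          · by_cases hk2 : s.2 = 2
            · rw [if_neg hk1, if_pos hk2, hk2]
              have h21 : ¬ ((2 : Int) = 1) := by omega
              by_cases hbad : PySem.Int.mod cN p = 0
              · rw [if_pos hbad, phase2_cons, if_neg h21,
                  if_neg (show ¬ ((2 : Int) = 2 ∧ PySem.Int.mod cN p ≠ 0) by simp [hbad]),
                  zero_mul, mul_zero]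
                split_ifs <;> rfl
              · rw [if_neg hbad, ih _ _ hm, phase2_cons, if_neg h21,
                  if_pos (show (2 : Int) = 2 ∧ PySem.Int.mod cN p ≠ 0 from ⟨rfl, hbad⟩), sq]
                split_ifs with hgt
                · rfl
                · ring
            · rw [if_neg hk1, if_neg hk2, phase2_cons, if_neg hk1,
                if_neg (show ¬ (s.2 = 2 ∧ PySem.Int.mod cN p ≠ 0) from fun hc => hk2 hc.1),
                zero_mul, mul_zero]
              split_ifs <;> rfl
        · have hk0' : (pySplit n.natAbs p n).2 = 0 := by
            rw [pySplit_snd_zero_iff _ _ _ hf]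
            intro hc; exact hz hc.2
          have hk0 : ¬ (pySplit n.natAbs p n).2 ≠ 0 := not_not_intro hk0'
          have hfix : (pySplit n.natAbs p n).1 = n := by
            cases hfn : n.natAbs with
            | zero => simp [pySplit]
            | succ f =>
              by_cases hp : p = 0
              · simp [pySplit, hp, PySem.Int.divmod?]
              · have hdm : PySem.Int.divmod? n p = some (PySem.Int.floordiv n p, PySem.Int.mod n p) := by
                  simp [PySem.Int.divmod?, hp, PySem.Int.floordiv, PySem.Int.mod]
                simp [pySplit, hdm, hz]
          simp only [loopA, phase1, if_neg h1, if_neg h2, if_neg hz, if_neg hk0, hfix]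
          exact ih _ _ hn

-- ===== VERDICT (by name: the statement is the Claim_ definition above) =====
theorem multiplicative_mu_from_ap_spec : Claim_equal_multiplicative_mu_from_ap := by
  intro n ap_dict curve_N _ hpre
  obtain ⟨h0, _⟩ := hpre
  unfold Spec_multiplicative_mu_from_ap multiplicative_mu_from_ap multiplicative_mu_from_ap_alt
  dsimp only
  by_cases hnil : ap_dict = []
  · subst hnil
    have hks : PySem.List.sorted (PySem.Dict.ofList ([] : List (Int × Int))).keys
        (fun x => x) false = [] := rfl
    rw [hks]
    by_cases h1 : n = 1
    · simp [h1, phase1, phase2]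
    · rw [if_neg h1]
      show postA n 1 = _
      unfold postA phase1 phase2
      split_ifs <;> simp_all
  · have hn : n ≠ 0 := by
      rcases h0 with h | h
      · exact h
      · exact absurd h hnil
    by_cases h1 : n = 1
    · subst h1
      rw [if_pos rfl]
      cases hks : PySem.List.sorted (PySem.Dict.ofList ap_dict).keys (fun x => x) false with
      | nil => simp [phase1, phase2]
      | cons p ps => simp [phase1, phase2]
    · rw [if_neg h1, loopA_eq_phases _ _ _ _ _ hn]
      simp
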